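-- pv_equiv track=rewrite | github.com/flashlin/Samples | openSource/qmd/finetune/reward.py | parse_expansion
-- ===== SOURCE A (Python) =====
-- def parse_expansion(text: str) -> dict:
--     """Parse a multi-line expansion into {lex, vec, hyde, invalid} lists."""
--     result = {"lex": [], "vec": [], "hyde": [], "invalid": []}
--     for line in text.strip().split("\n"):
--         line = line.strip()
--         if not line:
--             continue
--         if line.startswith("lex:"):
--             result["lex"].append(line[4:].strip())
--         elif line.startswith("vec:"):
--             result["vec"].append(line[4:].strip())
--         elif line.startswith("hyde:"):
--             result["hyde"].append(line[5:].strip())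
--         else:
--             result["invalid"].append(line)
--     return result
-- ===== SOURCE B (Python) =====
-- def parse_expansion(text: str) -> dict:
--     """Parse a multi-line expansion into {lex, vec, hyde, invalid} lists."""
--     lines = [ln for ln in (raw.strip() for raw in text.strip().split("\n")) if ln]
--
--     def tagged(tag):
--         return [ln[len(tag):].strip() for ln in lines if ln.startswith(tag)]
--
--     return {
--         "lex": tagged("lex:"),
--         "vec": tagged("vec:"),
--         "hyde": tagged("hyde:"),
--         "invalid": [ln for ln in lines
--                     if not (ln.startswith("lex:") or ln.startswith("vec:")
--                             or ln.startswith("hyde:"))],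
--     }
-- ===== Notes on version B (the rewrite author's own statement) =====
-- stated objective: alternative
-- what changed: Replaces A's single pass that threads a mutable result dict through an if/elif chain by staged passes: normalize the lines once, then build each of the four buckets with its own independent comprehension over the normalized lines.
import Mathlib
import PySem

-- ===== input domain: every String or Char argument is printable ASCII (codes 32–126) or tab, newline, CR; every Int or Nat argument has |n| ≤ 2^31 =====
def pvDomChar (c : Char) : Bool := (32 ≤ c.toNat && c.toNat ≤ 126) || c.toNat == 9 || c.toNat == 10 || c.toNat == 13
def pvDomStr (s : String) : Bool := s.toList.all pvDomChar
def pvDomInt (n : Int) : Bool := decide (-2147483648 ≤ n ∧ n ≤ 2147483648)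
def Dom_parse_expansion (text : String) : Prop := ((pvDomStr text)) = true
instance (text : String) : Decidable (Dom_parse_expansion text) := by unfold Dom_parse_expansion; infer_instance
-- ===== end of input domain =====

-- B replaces A's single accumulator-dict pass by staged passes: normalize the lines
-- once, then one independent comprehension per bucket (objective: alternative; same value).

-- ===== PORT A =====
-- one loop iteration of A's for-loop (the dict is threaded as the accumulator)
def pvStepA (d : PySem.Dict String (List String)) (line : String) :
    PySem.Dict String (List String) :=
  -- 'line' below stands for Python's re-bound line.strip()
  if line = "" then d
  else if PySem.Str.startswith line "lex:" then
    d.modify "lex" [] (· ++ [PySem.Str.strip (PySem.Str.slice line (some 4) none)])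
  else if PySem.Str.startswith line "vec:" then
    d.modify "vec" [] (· ++ [PySem.Str.strip (PySem.Str.slice line (some 4) none)])
  else if PySem.Str.startswith line "hyde:" then
    d.modify "hyde" [] (· ++ [PySem.Str.strip (PySem.Str.slice line (some 5) none)])
  else d.modify "invalid" [] (· ++ [line])

def parse_expansion (text : String) : List (String × List String) :=
  let init : PySem.Dict String (List String) :=
    ⟨[("lex", []), ("vec", []), ("hyde", []), ("invalid", [])]⟩
  match PySem.Str.split? (PySem.Str.strip text) "\n" with
  | some lines => (lines.foldl (fun d l => pvStepA d (PySem.Str.strip l)) init).items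
  | none => []   -- unreachable: the separator "\n" is nonempty

-- ===== PORT B =====
-- Source B's tagged(tag): comprehension = filter then map
def pvTagged (lines : List String) (tag : String) : List String :=
  (lines.filter (fun l => PySem.Str.startswith l tag)).map
    (fun l => PySem.Str.strip (PySem.Str.slice l (some (PySem.Str.len tag)) none))

def parse_expansion_alt (text : String) : List (String × List String) :=
  match PySem.Str.split? (PySem.Str.strip text) "\n" with
  | some raw =>
    let lines := (raw.map PySem.Str.strip).filter (fun l => !(l == ""))
    [("lex", pvTagged lines "lex:"),
     ("vec", pvTagged lines "vec:"),
     ("hyde", pvTagged lines "hyde:"),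
     ("invalid", lines.filter (fun l =>
        !(PySem.Str.startswith l "lex:" || PySem.Str.startswith l "vec:" ||
          PySem.Str.startswith l "hyde:")))]
  | none => []   -- unreachable: the separator "\n" is nonempty

-- ===== PRECONDITION & SPEC =====
def Spec_parse_expansion (text : String) (out : List (String × List String)) : Prop := out = parse_expansion_alt text
instance (text : String) (out : List (String × List String)) : Decidable (Spec_parse_expansion text out) := by unfold Spec_parse_expansion; infer_instance

-- ===== CLAIM (what is proved, stated in full; the proofs are below) =====
def Claim_equal_parse_expansion : Prop := ∀ (text : String), Dom_parse_expansion text → Spec_parse_expansion text (parse_expansion text)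

-- ===== LEMMAS AND PROOFS =====

-- the four-bucket invalid predicate of B
def pvInvalidP (l : String) : Bool :=
  !(PySem.Str.startswith l "lex:" || PySem.Str.startswith l "vec:" ||
    PySem.Str.startswith l "hyde:")

-- two prefixes starting with distinct characters cannot both be prefixes
theorem excl (l : String) (c c' : Char) (p p' : List Char) (hne : c ≠ c')
    (h : PySem.Chars.startswith l.toList (c :: p) = true) :
    PySem.Chars.startswith l.toList (c' :: p') = false := by
  rw [PySem.Chars.startswith_iff] at h
  rcases h with ⟨s, hs⟩
  rcases hb : PySem.Chars.startswith l.toList (c' :: p') with _ | _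
  · rfl
  · rw [PySem.Chars.startswith_iff] at hb
    rcases hb with ⟨t, ht⟩
    rw [← hs] at ht
    simp at ht
    exact absurd ht.1 (Ne.symm hne)

-- the fold of A over the raw lines, with a generic accumulator, produces B's four buckets
theorem fold_items (raw : List String) (a b c d : List String) :
    (raw.foldl (fun dct l => pvStepA dct (PySem.Str.strip l))
        ⟨[("lex", a), ("vec", b), ("hyde", c), ("invalid", d)]⟩).items
    = [("lex", a ++ pvTagged ((raw.map PySem.Str.strip).filter (fun l => !(l == ""))) "lex:"),
       ("vec", b ++ pvTagged ((raw.map PySem.Str.strip).filter (fun l => !(l == ""))) "vec:"),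
       ("hyde", c ++ pvTagged ((raw.map PySem.Str.strip).filter (fun l => !(l == ""))) "hyde:"),
       ("invalid", d ++ ((raw.map PySem.Str.strip).filter (fun l => !(l == ""))).filter pvInvalidP)] := by
  induction raw generalizing a b c d with
  | nil => simp [pvTagged]
  | cons l tl ih =>
    simp only [List.foldl_cons, List.map_cons, List.filter_cons]
    by_cases h0 : PySem.Str.strip l = ""
    · rw [h0]
      simpa [pvStepA] using ih a b c d
    · have hkeep : (!(PySem.Str.strip l == "")) = true := by
        simp [h0]
      rw [hkeep]
      simp only [if_true]
      set l' := PySem.Str.strip l with hl'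
      rcases s1 : PySem.Chars.startswith l'.toList ['l','e','x',':'] with _ | _
      · rcases s2 : PySem.Chars.startswith l'.toList ['v','e','c',':'] with _ | _
        · rcases s3 : PySem.Chars.startswith l'.toList ['h','y','d','e',':'] with _ | _
          · -- invalid line
            have hstep : pvStepA ⟨[("lex", a), ("vec", b), ("hyde", c), ("invalid", d)]⟩ l'
                = ⟨[("lex", a), ("vec", b), ("hyde", c), ("invalid", d ++ [l'])]⟩ := by
              simp [pvStepA, h0, s1, s2, s3, PySem.Dict.modify, PySem.Dict.getD,
                PySem.Dict.get?, PySem.Dict.insert, PySem.Dict.contains]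
            rw [hstep, ih]
            simp [pvTagged, s1, s2, s3, pvInvalidP]
          · -- hyde line
            have hstep : pvStepA ⟨[("lex", a), ("vec", b), ("hyde", c), ("invalid", d)]⟩ l'
                = ⟨[("lex", a), ("vec", b),
                    ("hyde", c ++ [PySem.Str.strip (PySem.Str.slice l' (some 5) none)]),
                    ("invalid", d)]⟩ := by
              simp [pvStepA, h0, s1, s2, s3, PySem.Dict.modify, PySem.Dict.getD,
                PySem.Dict.get?, PySem.Dict.insert, PySem.Dict.contains]
            rw [hstep, ih]
            simp [pvTagged, s1, s2, s3, pvInvalidP]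
        · -- vec line
          have s3 : PySem.Chars.startswith l'.toList ['h','y','d','e',':'] = false :=
            excl l' 'v' 'h' ['e','c',':'] ['y','d','e',':'] (by decide) s2
          have hstep : pvStepA ⟨[("lex", a), ("vec", b), ("hyde", c), ("invalid", d)]⟩ l'
              = ⟨[("lex", a),
                  ("vec", b ++ [PySem.Str.strip (PySem.Str.slice l' (some 4) none)]),
                  ("hyde", c), ("invalid", d)]⟩ := by
            simp [pvStepA, h0, s1, s2, PySem.Dict.modify, PySem.Dict.getD,
              PySem.Dict.get?, PySem.Dict.insert, PySem.Dict.contains]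
          rw [hstep, ih]
          simp [pvTagged, s1, s2, s3, pvInvalidP]
      · -- lex line
        have s2 : PySem.Chars.startswith l'.toList ['v','e','c',':'] = false :=
          excl l' 'l' 'v' ['e','x',':'] ['e','c',':'] (by decide) s1
        have s3 : PySem.Chars.startswith l'.toList ['h','y','d','e',':'] = false :=
          excl l' 'l' 'h' ['e','x',':'] ['y','d','e',':'] (by decide) s1
        have hstep : pvStepA ⟨[("lex", a), ("vec", b), ("hyde", c), ("invalid", d)]⟩ l'
            = ⟨[("lex", a ++ [PySem.Str.strip (PySem.Str.slice l' (some 4) none)]),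
                ("vec", b), ("hyde", c), ("invalid", d)]⟩ := by
          simp [pvStepA, h0, s1, PySem.Dict.modify, PySem.Dict.getD,
            PySem.Dict.get?, PySem.Dict.insert, PySem.Dict.contains]
        rw [hstep, ih]
        simp [pvTagged, s1, s2, s3, pvInvalidP]

-- ===== VERDICT (by name: the statement is the Claim_ definition above) =====
theorem parse_expansion_spec : Claim_equal_parse_expansion := by
  intro text _
  unfold Spec_parse_expansion parse_expansion parse_expansion_alt
  cases h : PySem.Str.split? (PySem.Str.strip text) "\n" with
  | none => rfl
  | some raw =>
    simp only []
    rw [fold_items]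
    simp [pvInvalidP]
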